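-- pv_equiv track=rewrite | github.com/eeleedev/LeetCode-CodeTree | 241110/나누고 빼면서 합하기/divide-and-subtract-and-add-up.py | sum_sequence
-- ===== SOURCE A (Python) =====
-- def sum_sequence(arr, m):
--     result = 0
--     while m > 1:
--         result += arr[m - 1]  # m번째 원소를 더함 (인덱스는 m-1)
--         if m % 2 == 0:
--             m //= 2  # 짝수일 경우 2로 나눔
--         else:
--             m -= 1  # 홀수일 경우 1을 뺌
--     result += arr[0]  # 마지막으로 m이 1일 때 arr[0]을 더함
--     return result
-- ===== SOURCE B (Python) =====
-- def sum_sequence(arr, m):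
--     # Bit-walk: the divide/subtract process visits, for each bit position i
--     # with m >> i > 1, the index (m >> i) - 1, plus (m >> i) - 2 when m >> i is odd.
--     if m <= 1:
--         return arr[0]
--     total = arr[0]
--     for i in range(m.bit_length() - 1):
--         v = m >> i
--         total += arr[v - 1]
--         if v & 1:
--             total += arr[v - 2]
--     return total
-- ===== Notes on version B (the rewrite author's own statement) =====
-- stated objective: alternative
-- what changed: B replaces A's state-mutating while-loop (halve-if-even/decrement-if-odd on m) with a bounded for-loop over the bit positions of m: each iteration reads v = m >> i and adds arr[v-1] plus, when v is odd, arr[v-2], so the odd steps of A's walk collapse into the even ones and m is never mutated.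
import Mathlib
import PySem

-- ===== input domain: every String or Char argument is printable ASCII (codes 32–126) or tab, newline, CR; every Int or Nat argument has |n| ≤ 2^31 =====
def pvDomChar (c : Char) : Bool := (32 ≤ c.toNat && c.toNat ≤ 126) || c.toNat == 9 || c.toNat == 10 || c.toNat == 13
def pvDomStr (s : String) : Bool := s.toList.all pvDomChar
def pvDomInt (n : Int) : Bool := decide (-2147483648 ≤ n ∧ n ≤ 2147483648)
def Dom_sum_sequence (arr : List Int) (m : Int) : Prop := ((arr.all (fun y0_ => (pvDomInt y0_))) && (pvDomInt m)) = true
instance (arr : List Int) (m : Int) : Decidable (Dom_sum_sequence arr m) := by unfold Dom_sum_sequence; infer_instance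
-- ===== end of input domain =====

-- B replaces A's state-mutating while-loop with a for-loop over the bit positions of m (v = m >> i), folding A's odd steps into the even ones (alternative decomposition, same cost).


-- ===== PORT A =====
-- A's while-loop: accumulate result while halving/decrementing m.
def sumSeqLoop (arr : List Int) (m : Int) (result : Int) : Int :=
  if h : m > 1 then
    sumSeqLoop arr (if PySem.Int.mod m 2 = 0 then PySem.Int.floordiv m 2 else m - 1)
      (result + (PySem.List.pyGet? arr (m - 1)).getD 0)
  else
    result + (PySem.List.pyGet? arr 0).getD 0
termination_by m.toNat
decreasing_by
  have h2 : PySem.Int.floordiv m 2 = m / 2 := PySem.Int.floordiv_eq_ediv_of_pos (by omega)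
  split <;> omega

def sum_sequence (arr : List Int) (m : Int) : Int := sumSeqLoop arr m 0

-- ===== PORT B =====
-- B's loop body: v = m >> i; total += arr[v-1]; if v & 1: total += arr[v-2]
def bStep (arr : List Int) (m : Int) (total : Int) (i : Nat) : Int :=
  let v : Int := m >>> i
  let t := total + (PySem.List.pyGet? arr (v - 1)).getD 0
  if PySem.Int.band v 1 ≠ 0 then t + (PySem.List.pyGet? arr (v - 2)).getD 0 else t

def sum_sequence_alt (arr : List Int) (m : Int) : Int :=
  if m ≤ 1 then (PySem.List.pyGet? arr 0).getD 0
  else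
    (List.range (PySem.Int.bitLength m - 1)).foldl (bStep arr m)
      ((PySem.List.pyGet? arr 0).getD 0)

-- ===== PRECONDITION & SPEC =====
-- Pre_ excludes exactly the inputs where Python A raises IndexError: empty arr (the final arr[0]),
-- or m exceeding len(arr) (the first access arr[m-1]; later indices are strictly smaller).
def Pre_sum_sequence (arr : List Int) (m : Int) : Prop := arr ≠ [] ∧ m ≤ arr.length
instance (arr : List Int) (m : Int) : Decidable (Pre_sum_sequence arr m) := by
  unfold Pre_sum_sequence; infer_instance
def pvWitness_sum_sequence : List Int × Int := ([3, 1, 4, 1, 5, 9], 6)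
def Spec_sum_sequence (arr : List Int) (m : Int) (out : Int) : Prop := out = sum_sequence_alt arr m
instance (arr : List Int) (m : Int) (out : Int) : Decidable (Spec_sum_sequence arr m out) := by
  unfold Spec_sum_sequence; infer_instance

-- ===== CLAIM (what is proved, stated in full; the proofs are below) =====
def Claim_equal_sum_sequence : Prop := ∀ (arr : List Int) (m : Int), Dom_sum_sequence arr m → Pre_sum_sequence arr m → Spec_sum_sequence arr m (sum_sequence arr m)

-- ===== LEMMAS AND PROOFS =====
-- Common characterisation: the total contribution of the walk started at v (a Nat), by halving.
def gsum (arr : List Int) (v : Nat) : Int :=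
  if h : 2 ≤ v then
    (PySem.List.pyGet? arr ((v : Int) - 1)).getD 0
      + (if v % 2 = 1 then (PySem.List.pyGet? arr ((v : Int) - 2)).getD 0 else 0)
      + gsum arr (v / 2)
  else 0
termination_by v
decreasing_by omega

theorem gsum_of_le_one (arr : List Int) (v : Nat) (h : v ≤ 1) : gsum arr v = 0 := by
  rw [gsum, dif_neg (by omega)]

-- A's loop equals the accumulator plus gsum of m plus arr[0].
theorem sumSeqLoop_eq (arr : List Int) (m result : Int) :
    sumSeqLoop arr m result = result + gsum arr m.toNat + (PySem.List.pyGet? arr 0).getD 0 := by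
  fun_induction sumSeqLoop arr m result with
  | case1 m result h ih =>
      have ht : ((m.toNat : Int)) = m := Int.toNat_of_nonneg (by omega)
      have ht2 : 2 ≤ m.toNat := by omega
      have hmod : PySem.Int.mod m 2 = m % 2 := PySem.Int.mod_eq_emod_of_pos (by omega)
      have hdiv : PySem.Int.floordiv m 2 = m / 2 := PySem.Int.floordiv_eq_ediv_of_pos (by omega)
      rw [hmod, hdiv] at ih ⊢
      by_cases hpar : m % 2 = 0
      · rw [dif_pos hpar] at ih
        rw [if_pos hpar, ih]
        have hg : gsum arr m.toNat
            = (PySem.List.pyGet? arr (m - 1)).getD 0 + 0 + gsum arr (m / 2).toNat := by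
          rw [gsum, dif_pos ht2, if_neg (by omega : ¬ m.toNat % 2 = 1), ht]
          congr 2
          omega
        rw [hg]
        ring
      · rw [dif_neg hpar] at ih
        have hm1 : m % 2 = 1 := by omega
        rw [if_neg hpar, ih]
        -- gsum at m-1 (even, ≥ 2 since m ≥ 3)
        have hm3 : (3:Int) ≤ m := by omega
        have hg1 : gsum arr (m - 1).toNat
            = (PySem.List.pyGet? arr (m - 2)).getD 0 + 0 + gsum arr (m.toNat / 2) := by
          rw [gsum, dif_pos (by omega : 2 ≤ (m-1).toNat),
              if_neg (by omega : ¬ (m-1).toNat % 2 = 1)]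
          have e1 : (((m-1).toNat : Int)) - 1 = m - 2 := by omega
          have e2 : (m-1).toNat / 2 = m.toNat / 2 := by omega
          rw [e1, e2]
        have hg : gsum arr m.toNat
            = (PySem.List.pyGet? arr (m - 1)).getD 0 + (PySem.List.pyGet? arr (m - 2)).getD 0
              + gsum arr (m.toNat / 2) := by
          rw [gsum, dif_pos ht2, if_pos (by omega : m.toNat % 2 = 1), ht]
        rw [hg1, hg]
        ring
  | case2 m result h =>
      rw [gsum_of_le_one arr _ (by omega)]
      ring

-- casting shifts: Int shift of a Nat cast is the Nat shift, cast.
theorem int_shift_natCast (v i : Nat) : ((v : Int) >>> i) = ((v >>> i : Nat) : Int) := rfl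

-- B's fold over the bit positions equals init plus gsum.
theorem fold_bStep (arr : List Int) : ∀ (n : Nat) (v : Nat) (init : Int),
    1 ≤ v → PySem.Int.bitLength (v : Int) = n + 1 →
    (List.range n).foldl (bStep arr (v : Int)) init = init + gsum arr v := by
  intro n
  induction n with
  | zero =>
      intro v init hv hbl
      have := PySem.Int.lt_two_pow_bitLength (v : Int)
      rw [hbl] at this
      simp only [Int.natAbs_natCast] at this
      have hv1 : v = 1 := by omega
      subst hv1
      simp [gsum_of_le_one arr 1 (by omega)]
  | succ k ih =>
      intro v init hv hbl
      have hv2 : 2 ≤ v := by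
        by_contra hc
        have hv1 : v = 1 := by omega
        subst hv1
        have : PySem.Int.bitLength ((1:Nat) : Int) = 1 := by decide
        omega
      have hrec := PySem.Int.bitLength_natCast (m := v) (by omega)
      have hbl2 : PySem.Int.bitLength ((v / 2 : Nat) : Int) = k + 1 := by omega
      rw [List.range_succ_eq_map, List.foldl_cons, List.foldl_map]
      have hfun : (fun (t : Int) (i : Nat) => bStep arr (v : Int) t (i + 1))
          = bStep arr ((v / 2 : Nat) : Int) := by
        funext t i
        have hs : ((v : Int) >>> (i + 1)) = (((v / 2) : Nat) : Int) >>> i := by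
          rw [int_shift_natCast, int_shift_natCast]
          congr 1
          rw [Nat.shiftRight_eq_div_pow, Nat.shiftRight_eq_div_pow,
              Nat.div_div_eq_div_mul, pow_succ]
          ring_nf
        simp only [bStep, hs]
      rw [hfun, ih (v / 2) _ (by omega) hbl2]
      -- now equate the head step with gsum's head
      conv_rhs => rw [gsum]
      rw [dif_pos hv2]
      have hshift0 : ((v : Int) >>> (0 : Nat)) = (v : Int) := rfl
      have hband : PySem.Int.band (v : Int) 1 = PySem.Int.mod (v : Int) 2 :=
        PySem.Int.band_one _
      have hmod : PySem.Int.mod (v : Int) 2 = ((v % 2 : Nat) : Int) :=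
        PySem.Int.mod_natCast v 2
      simp only [bStep, hshift0, hband, hmod]
      by_cases hpar : v % 2 = 1
      · rw [if_pos hpar, if_pos (by rw [hpar]; decide)]
        ring
      · rw [if_neg hpar, if_neg (by omega : ¬ (((v % 2 : Nat) : Int) ≠ 0))]
        ring

-- B equals gsum plus arr[0].
theorem alt_eq (arr : List Int) (m : Int) :
    sum_sequence_alt arr m = gsum arr m.toNat + (PySem.List.pyGet? arr 0).getD 0 := by
  unfold sum_sequence_alt
  by_cases hm : m ≤ 1
  · rw [if_pos hm, gsum_of_le_one arr _ (by omega)]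
    ring
  · rw [if_neg hm]
    have ht : ((m.toNat : Int)) = m := Int.toNat_of_nonneg (by omega)
    have hbl : 1 ≤ PySem.Int.bitLength m := by
      have := PySem.Int.bitLength_natCast (m := m.toNat) (by omega)
      rw [ht] at this
      omega
    have := fold_bStep arr (PySem.Int.bitLength m - 1) m.toNat
      ((PySem.List.pyGet? arr 0).getD 0) (by omega) (by rw [ht]; omega)
    rw [ht] at this
    rw [this]
    ring

-- ===== VERDICT (by name: the statement is the Claim_ definition above) =====
theorem sum_sequence_spec : Claim_equal_sum_sequence := by
  intro arr m _ _
  unfold Spec_sum_sequence sum_sequence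
  rw [sumSeqLoop_eq, alt_eq]
  ring
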